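-- pv_equiv track=rewrite | github.com/miaortizma/competitive-programming | online_judges/Codeforces/102423/a/pot.py | pot
-- ===== SOURCE A (Python) =====
-- def pot(x):
--     ans=[0 for i in range(100)]
--     x1=str(x)
--     for i in range(len(x1)):
--         for j in range(len(x1)):
--             ans[i+j]=(ans[i+j]+int(x1[i])*int(x1[j]))%10
--     res=""
--     for i in range(100):
--         res+=str(ans[i])
--     res=str(int(res[::-1]))[::-1]
--     return res
-- ===== SOURCE B (Python) =====
-- def pot(x):
--     BASE = 10 ** 4  # each convolution coefficient is < 50*81 < BASE, so slots never interfere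
--     P = 0
--     for c in reversed(str(x)):
--         P = P * BASE + int(c)
--     q = P * P
--     res = ""
--     for _ in range(100):
--         res += str(q % BASE % 10)
--         q //= BASE
--     return str(int(res[::-1]))[::-1]
-- ===== Notes on version B (the rewrite author's own statement) =====
-- stated objective: alternative
-- what changed: B replaces A's nested-loop digit self-convolution and 100-cell accumulator array by big-integer arithmetic: it packs the digits into one integer in base 10^4, squares it once (one multiplication computes the whole convolution, slots cannot interfere since each coefficient is < 50*81), and reads the coefficients back mod 10 by repeated divmod; only the final high-zero trimming via str(int(rev)) is kept, since that is the function's output format.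
import Mathlib
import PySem

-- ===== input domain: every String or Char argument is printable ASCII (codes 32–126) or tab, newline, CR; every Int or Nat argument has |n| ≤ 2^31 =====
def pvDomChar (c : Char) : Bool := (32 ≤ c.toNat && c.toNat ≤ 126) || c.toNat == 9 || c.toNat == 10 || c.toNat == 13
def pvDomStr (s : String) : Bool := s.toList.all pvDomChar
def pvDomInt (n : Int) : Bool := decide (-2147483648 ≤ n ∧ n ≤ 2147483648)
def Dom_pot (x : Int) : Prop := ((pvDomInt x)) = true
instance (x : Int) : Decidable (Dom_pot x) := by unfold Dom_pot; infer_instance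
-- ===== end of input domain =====

set_option maxRecDepth 8192

-- B replaces A's nested-loop digit self-convolution by big-integer arithmetic: pack the digits
-- into one integer in base 10^4, square it once, and read the coefficients back mod 10 by
-- repeated divmod; only the final high-zero trimming via str(int(.)) (the output format) is kept.

-- ===== PORT A =====
-- int(x1[i]) for a 1-character slice of x1 (0 where Python raises; such inputs lie outside Pre_pot)
def potDig (x1 : String) (i : Int) : Int :=
  ((PySem.Str.pyGet? x1 i).bind (fun c => PySem.Int.ofChars? [c])).getD 0

def pot (x : Int) : String :=
  -- ans = [0 for i in range(100)]
  let ans : List Int := (PySem.List.pyRange 0 100 1).map (fun _ => (0 : Int))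
  -- x1 = str(x)
  let x1 : String := PySem.Int.toStr x
  -- for i in range(len(x1)): for j in range(len(x1)): ans[i+j] = (ans[i+j] + int(x1[i])*int(x1[j])) % 10
  let ans : List Int :=
    (PySem.List.pyRange 0 (PySem.Str.len x1) 1).foldl (fun a i =>
      (PySem.List.pyRange 0 (PySem.Str.len x1) 1).foldl (fun a j =>
        PySem.List.pySetD a (i + j)
          (PySem.Int.mod (PySem.List.pyGetD a (i + j) 0 + potDig x1 i * potDig x1 j) 10)) a) ans
  -- res = ""; for i in range(100): res += str(ans[i])
  let res : List Char :=
    (PySem.List.pyRange 0 100 1).foldl (fun r i =>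
      r ++ PySem.Int.toChars (PySem.List.pyGetD ans i 0)) []
  -- res = str(int(res[::-1]))[::-1]
  let res1 : List Char := (PySem.List.slice? res none none (-1)).getD []
  let res2 : List Char := PySem.Int.toChars ((PySem.Int.ofChars? res1).getD 0)
  let res3 : List Char := (PySem.List.slice? res2 none none (-1)).getD []
  String.ofList res3

-- ===== PORT B =====
-- int(c) for a single character c (0 where Python raises; such inputs lie outside Pre_pot)
def potChVal (c : Char) : Int := (PySem.Int.ofChars? [c]).getD 0

def pot_alt (x : Int) : String :=
  -- BASE = 10 ** 4;  P = 0
  -- for c in reversed(str(x)): P = P * BASE + int(c)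
  let P : Int := (PySem.Int.toStr x).toList.reverse.foldl
      (fun P c => P * 10000 + potChVal c) 0
  -- q = P * P;  res = ""
  -- for _ in range(100): res += str(q % BASE % 10); q //= BASE
  let st : List Char × Int := (PySem.List.pyRange 0 100 1).foldl
      (fun st _ => (st.1 ++ PySem.Int.toChars (PySem.Int.mod (PySem.Int.mod st.2 10000) 10),
                    PySem.Int.floordiv st.2 10000)) ([], P * P)
  -- return str(int(res[::-1]))[::-1]
  let res1 : List Char := (PySem.List.slice? st.1 none none (-1)).getD []
  let res2 : List Char := PySem.Int.toChars ((PySem.Int.ofChars? res1).getD 0)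
  String.ofList ((PySem.List.slice? res2 none none (-1)).getD [])

-- ===== PRECONDITION & SPEC =====
-- Pre_pot excludes negative x, on which Python's int() of the '-' character raises ValueError in both A and B.
def Pre_pot (x : Int) : Prop := 0 ≤ x
instance (x : Int) : Decidable (Pre_pot x) := by unfold Pre_pot; infer_instance
def pvWitness_pot : Int := 1234

def Spec_pot (x : Int) (out : String) : Prop := out = pot_alt x
instance (x : Int) (out : String) : Decidable (Spec_pot x out) := by unfold Spec_pot; infer_instance

-- ===== CLAIM (what is proved, stated in full; the proofs are below) =====
def Claim_equal_pot : Prop := ∀ (x : Int), Dom_pot x → Pre_pot x → Spec_pot x (pot x)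

-- ===== LEMMAS AND PROOFS =====

-- digit value of character k of cs (common reading of both ports' digit accesses)
def potDigL (cs : List Char) (k : Nat) : Int :=
  ((cs[k]?).bind (fun c => PySem.Int.ofChars? [c])).getD 0

-- one additive update step on the accumulator list, raw (no mod)
def potStep (a : List Int) (p : Nat × Int) : List Int := a.set p.1 (a.getD p.1 0 + p.2)

-- the same step with A's per-iteration mod-10 reduction
def potStepM (a : List Int) (p : Nat × Int) : List Int :=
  a.set p.1 (PySem.Int.mod (a.getD p.1 0 + p.2) 10)

-- the (target index, addend) pairs of A's square loop
def potPairsA (cs : List Char) : List (Nat × Int) :=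
  (List.range cs.length).flatMap (fun i =>
    (List.range cs.length).map (fun j => (i + j, potDigL cs i * potDigL cs j)))

-- the self-convolution coefficient of the digit string at index k
def potConv (cs : List Char) (k : Nat) : Int :=
  ∑ i ∈ Finset.range cs.length, ∑ j ∈ Finset.range cs.length,
    (if i + j = k then potDigL cs i * potDigL cs j else 0)

lemma potFold_length (ps : List (Nat × Int)) (a : List Int) :
    (ps.foldl potStep a).length = a.length := by
  induction ps generalizing a with
  | nil => rfl
  | cons p ps ih => simp [List.foldl_cons, ih, potStep]

lemma getD_set_self (a : List Int) (k : Nat) (v : Int) (hk : k < a.length) :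
    (a.set k v).getD k 0 = v := by
  simp [List.getD_eq_getElem?_getD, hk]

lemma getD_set_ne (a : List Int) (i k : Nat) (v : Int) (h : i ≠ k) :
    (a.set i v).getD k 0 = a.getD k 0 := by
  simp [List.getD_eq_getElem?_getD, h]

-- entry k of the raw fold is the initial entry plus the sum of the addends aimed at k
lemma potFold_getD (ps : List (Nat × Int)) (a : List Int) (k : Nat) (hk : k < a.length) :
    (ps.foldl potStep a).getD k 0 =
      a.getD k 0 + ((ps.filter (fun p => p.1 == k)).map (·.2)).sum := by
  induction ps generalizing a with
  | nil => simp
  | cons p ps ih =>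
    rw [List.foldl_cons, ih _ (by simp [potStep, hk])]
    by_cases h : p.1 = k
    · subst h
      rw [List.filter_cons_of_pos (by simp), List.map_cons, List.sum_cons,
        potStep, getD_set_self _ _ _ hk]
      ring
    · rw [List.filter_cons_of_neg (by simpa using h), potStep, getD_set_ne _ _ _ _ h]

lemma map_mod_getD (a : List Int) (k : Nat) :
    (a.map (fun v => PySem.Int.mod v 10)).getD k 0 = PySem.Int.mod (a.getD k 0) 10 := by
  by_cases hk : k < a.length
  · simp [List.getD_eq_getElem?_getD, List.getElem?_eq_getElem hk]
  · rw [List.getD_eq_default _ _ (by simpa using hk), List.getD_eq_default _ _ (by omega)]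
    rfl

lemma mod_absorb (u w : Int) :
    PySem.Int.mod (PySem.Int.mod u 10 + w) 10 = PySem.Int.mod (u + w) 10 := by
  simp only [PySem.Int.mod_eq_emod_of_pos (show (0:Int) < 10 by norm_num)]
  omega

-- A's modded fold is the raw fold followed by a pointwise mod
lemma potFoldM_eq_map_mod (ps : List (Nat × Int)) (a : List Int) :
    ps.foldl potStepM (a.map (fun v => PySem.Int.mod v 10)) =
      (ps.foldl potStep a).map (fun v => PySem.Int.mod v 10) := by
  induction ps generalizing a with
  | nil => rfl
  | cons p ps ih =>
    rw [List.foldl_cons, List.foldl_cons, ← ih (potStep a p)]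
    congr 1
    rw [potStepM, potStep, List.map_set, map_mod_getD, mod_absorb]

-- sum over a filtered flatMap decomposes rowwise
lemma sum_filter_map_flatMap {α : Type} (l : List α) (g : α → List (Nat × Int)) (k : Nat) :
    (((l.flatMap g).filter (fun p => p.1 == k)).map (·.2)).sum =
      (l.map (fun i => (((g i).filter (fun p => p.1 == k)).map (·.2)).sum)).sum := by
  induction l with
  | nil => rfl
  | cons x t ih => simp [List.flatMap_cons, List.filter_append, ih]

-- sum over a filtered map as a sum of ite
lemma sum_filter_map_map {α : Type} (l : List α) (e : α → Nat × Int) (k : Nat) :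
    (((l.map e).filter (fun p => p.1 == k)).map (·.2)).sum =
      (l.map (fun x => if (e x).1 = k then (e x).2 else 0)).sum := by
  induction l with
  | nil => rfl
  | cons x t ih =>
    by_cases h : (e x).1 = k
    · simp [h, ih]
    · simp [h, ih]

-- a List.range/map sum is the Finset.range sum
lemma sum_range_list (n : Nat) (f : Nat → Int) :
    ((List.range n).map f).sum = ∑ i ∈ Finset.range n, f i := rfl

-- per-target sums of A's pair list are the convolution coefficients
lemma potPairsA_sum (cs : List Char) (k : Nat) :
    (((potPairsA cs).filter (fun p => p.1 == k)).map (·.2)).sum = potConv cs k := by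
  rw [potPairsA, sum_filter_map_flatMap, potConv, sum_range_list]
  refine Finset.sum_congr rfl (fun i _ => ?_)
  rw [sum_filter_map_map, sum_range_list]

lemma potDig_natCast (x1 : String) (k : Nat) : potDig x1 (k : Int) = potDigL x1.toList k := by
  rw [potDig, potDigL, PySem.Str.pyGet?_natCast]

-- A's double loop is the modded fold over its pair list
lemma potA_loop (x1 : String) (a0 : List Int) :
    (PySem.List.pyRange 0 (PySem.Str.len x1) 1).foldl (fun a i =>
      (PySem.List.pyRange 0 (PySem.Str.len x1) 1).foldl (fun a j =>
        PySem.List.pySetD a (i + j)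
          (PySem.Int.mod (PySem.List.pyGetD a (i + j) 0 + potDig x1 i * potDig x1 j) 10)) a) a0
    = (potPairsA x1.toList).foldl potStepM a0 := by
  rw [potPairsA, List.foldl_flatMap]
  rw [PySem.Str.len_eq, PySem.List.pyRange_zero_natCast]
  simp only [List.foldl_map]
  congr 1
  funext a ki
  congr 1
  funext b kj
  rw [potStepM, potDig_natCast, potDig_natCast,
    show ((ki : Int) + (kj : Int)) = ((ki + kj : Nat) : Int) by push_cast; ring,
    PySem.List.pySetD_natCast, PySem.List.pyGetD_natCast]

-- A's raw accumulator is exactly the list of convolution coefficients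
lemma ansA_eq (cs : List Char) :
    (potPairsA cs).foldl potStep (List.replicate 100 (0:Int))
      = (List.range 100).map (fun k => potConv cs k) := by
  apply List.ext_getElem
  · simp [potFold_length]
  · intro k h1 h2
    have hk : k < (100 : Nat) := by simpa [potFold_length] using h1
    rw [← List.getD_eq_getElem _ 0 h1, potFold_getD _ _ _ (by simpa using hk), potPairsA_sum,
      List.getD_eq_getElem _ 0 (by simpa using hk), List.getElem_replicate,
      List.getElem_map, List.getElem_range, zero_add]

lemma map_getD_range (a : List Int) (f : Int → List Char) :
    (List.range a.length).map (fun k => f (a.getD k 0)) = a.map f := by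
  apply List.ext_getElem
  · simp
  · intro i h1 h2
    simp at h1
    simp [List.getD_eq_getElem?_getD, List.getElem?_eq_getElem h1]

lemma foldl_append_f {α : Type} (l : List α) (g : α → List Char) (init : List Char) :
    l.foldl (fun r i => r ++ g i) init = init ++ (l.map g).flatten := by
  induction l generalizing init with
  | nil => simp
  | cons x t ih => simp [List.foldl_cons, ih]

-- A's res-building loop flattens the decimal pictures of the 100 entries
lemma res_loop (ansA : List Int) (h : ansA.length = 100) :
    (PySem.List.pyRange 0 100 1).foldl (fun r i =>
      r ++ PySem.Int.toChars (PySem.List.pyGetD ansA i 0)) []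
      = (ansA.map PySem.Int.toChars).flatten := by
  rw [show (100 : Int) = ((100 : Nat) : Int) from rfl, PySem.List.pyRange_zero_natCast,
    List.foldl_map]
  simp only [PySem.List.pyGetD_natCast]
  rw [foldl_append_f, ← h, map_getD_range]
  simp

-- ===== B-side lemmas =====

-- little-endian value of a coefficient list in base 10000
def potValB (L : List Int) : Int := L.foldr (fun a v => a + 10000 * v) 0

-- B's digit-packing fold computes the little-endian base-10000 value of the digit values
lemma potP_eq (cs : List Char) :
    cs.reverse.foldl (fun P c => P * 10000 + potChVal c) 0 = potValB (cs.map potChVal) := by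
  rw [List.foldl_reverse]
  induction cs with
  | nil => rfl
  | cons c t ih =>
    rw [List.foldr_cons, ih, List.map_cons]
    simp only [potValB, List.foldr_cons]
    ring

lemma potDigL_cons_zero (c : Char) (t : List Char) : potDigL (c :: t) 0 = potChVal c := rfl

lemma potDigL_cons_succ (c : Char) (t : List Char) (i : Nat) :
    potDigL (c :: t) (i + 1) = potDigL t i := rfl

-- the packed value as a power sum
lemma potVal_sum (cs : List Char) :
    potValB (cs.map potChVal) = ∑ i ∈ Finset.range cs.length, potDigL cs i * 10000 ^ i := by
  induction cs with
  | nil => rfl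
  | cons c t ih =>
    rw [List.map_cons, potValB, List.foldr_cons, ← potValB, ih, List.length_cons,
      Finset.sum_range_succ']
    simp only [potDigL_cons_succ, potDigL_cons_zero, pow_succ, pow_zero,
      Finset.mul_sum]
    rw [Finset.sum_congr rfl (fun i _ => by ring : ∀ i ∈ Finset.range t.length,
      potDigL t i * (10000 ^ i * 10000) = 10000 * (potDigL t i * 10000 ^ i))]
    ring

-- Cauchy product: the square of the power sum has the convolution coefficients
lemma potCauchy (cs : List Char) (h : cs.length ≤ 50) :
    (∑ i ∈ Finset.range cs.length, potDigL cs i * 10000 ^ i) *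
      (∑ j ∈ Finset.range cs.length, potDigL cs j * 10000 ^ j)
      = ∑ k ∈ Finset.range 100, potConv cs k * 10000 ^ k := by
  rw [Finset.sum_mul_sum]
  refine Eq.symm ?_
  calc ∑ k ∈ Finset.range 100, potConv cs k * 10000 ^ k
      = ∑ k ∈ Finset.range 100, ∑ i ∈ Finset.range cs.length, ∑ j ∈ Finset.range cs.length,
          ((if i + j = k then potDigL cs i * potDigL cs j else 0) * 10000 ^ k) := by
        refine Finset.sum_congr rfl (fun k _ => ?_)
        rw [potConv, Finset.sum_mul]
        exact Finset.sum_congr rfl (fun i _ => by rw [Finset.sum_mul])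
    _ = ∑ i ∈ Finset.range cs.length, ∑ j ∈ Finset.range cs.length, ∑ k ∈ Finset.range 100,
          ((if i + j = k then potDigL cs i * potDigL cs j else 0) * 10000 ^ k) := by
        rw [Finset.sum_comm]
        exact Finset.sum_congr rfl (fun i _ => by rw [Finset.sum_comm])
    _ = ∑ i ∈ Finset.range cs.length, ∑ j ∈ Finset.range cs.length,
          potDigL cs i * 10000 ^ i * (potDigL cs j * 10000 ^ j) := by
        refine Finset.sum_congr rfl (fun i hi => Finset.sum_congr rfl (fun j hj => ?_))
        have hij : i + j ∈ Finset.range 100 := by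
          have := Finset.mem_range.mp hi
          have := Finset.mem_range.mp hj
          exact Finset.mem_range.mpr (by omega)
        have hite : ∀ k, (if i + j = k then potDigL cs i * potDigL cs j else 0) * 10000 ^ k
            = (if i + j = k then potDigL cs i * potDigL cs j * 10000 ^ (i + j) else 0) := by
          intro k
          by_cases h : i + j = k
          · subst h; simp
          · simp [h]
        rw [Finset.sum_congr rfl (fun k _ => hite k), Finset.sum_ite_eq, if_pos hij, pow_add]
        ring

lemma potValB_append (l : List Int) (e : Int) :
    potValB (l ++ [e]) = potValB l + 10000 ^ l.length * e := by
  induction l with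
  | nil => simp [potValB]
  | cons a t ih =>
    simp only [List.cons_append, potValB, List.foldr_cons] at ih ⊢
    rw [ih, List.length_cons, pow_succ]
    ring

lemma potValB_map_range (m : Nat) (f : Nat → Int) :
    potValB ((List.range m).map f) = ∑ k ∈ Finset.range m, f k * 10000 ^ k := by
  induction m with
  | zero => rfl
  | succ m ih =>
    rw [List.range_succ, List.map_append, List.map_cons, List.map_nil, potValB_append,
      ih, Finset.sum_range_succ, List.length_map, List.length_range]
    ring

-- every character of str(x) for 0 ≤ x is a decimal digit
lemma toStr_digits (x : Int) (hx : 0 ≤ x) :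
    ∀ c ∈ (PySem.Int.toStr x).toList, c.isDigit = true := by
  intro c hc
  rw [PySem.Int.toList_toStr, PySem.Int.toChars, if_neg (by omega)] at hc
  exact Nat.isDigit_of_mem_toDigits (by norm_num) (by norm_num) hc

lemma char_of_toNat (c : Char) (n : Nat) (h : c.toNat = n) (d : Char) (hd : d.toNat = n) :
    c = d :=
  Char.ext (UInt32.toNat_inj.mp (by simp only [Char.toNat] at h hd; omega))

-- the numeric value of a digit character lies in [0, 9]
lemma potChVal_digit (c : Char) (h : c.isDigit = true) : 0 ≤ potChVal c ∧ potChVal c ≤ 9 := by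
  have hb : 48 ≤ c.toNat ∧ c.toNat ≤ 57 := by
    simp [Char.isDigit] at h; exact h
  have h10 : c.toNat = 48 ∨ c.toNat = 49 ∨ c.toNat = 50 ∨ c.toNat = 51 ∨ c.toNat = 52 ∨
      c.toNat = 53 ∨ c.toNat = 54 ∨ c.toNat = 55 ∨ c.toNat = 56 ∨ c.toNat = 57 := by omega
  rcases h10 with h|h|h|h|h|h|h|h|h|h
  · rw [char_of_toNat c _ h '0' (by decide)]; decide
  · rw [char_of_toNat c _ h '1' (by decide)]; decide
  · rw [char_of_toNat c _ h '2' (by decide)]; decide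
  · rw [char_of_toNat c _ h '3' (by decide)]; decide
  · rw [char_of_toNat c _ h '4' (by decide)]; decide
  · rw [char_of_toNat c _ h '5' (by decide)]; decide
  · rw [char_of_toNat c _ h '6' (by decide)]; decide
  · rw [char_of_toNat c _ h '7' (by decide)]; decide
  · rw [char_of_toNat c _ h '8' (by decide)]; decide
  · rw [char_of_toNat c _ h '9' (by decide)]; decide

-- all indexed digit values lie in [0, 9] (out-of-range reads give 0)
lemma potDigL_bounds (cs : List Char) (hd : ∀ c ∈ cs, c.isDigit = true) (i : Nat) :
    0 ≤ potDigL cs i ∧ potDigL cs i ≤ 9 := by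
  rw [potDigL]
  cases hg : cs[i]? with
  | none => simp
  | some c =>
    have := potChVal_digit c (hd c (List.mem_of_getElem? hg))
    simpa [potChVal] using this

-- convolution coefficients fit in one base-10000 slot
lemma potConv_bounds (cs : List Char) (hd : ∀ c ∈ cs, c.isDigit = true)
    (hn : cs.length ≤ 10) (k : Nat) : 0 ≤ potConv cs k ∧ potConv cs k < 10000 := by
  have hb := potDigL_bounds cs hd
  constructor
  · refine Finset.sum_nonneg (fun i _ => Finset.sum_nonneg (fun j _ => ?_))
    by_cases h : i + j = k
    · simp only [if_pos h]
      exact mul_nonneg (hb i).1 (hb j).1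
    · simp [h]
  · have hle : potConv cs k ≤ ∑ _i ∈ Finset.range cs.length, ∑ _j ∈ Finset.range cs.length, (81 : Int) := by
      refine Finset.sum_le_sum (fun i _ => Finset.sum_le_sum (fun j _ => ?_))
      by_cases h : i + j = k
      · simp only [if_pos h]
        calc potDigL cs i * potDigL cs j ≤ 9 * 9 :=
              mul_le_mul (hb i).2 (hb j).2 (hb j).1 (by norm_num)
          _ = 81 := by norm_num
      · simp [h]
    have : (∑ _i ∈ Finset.range cs.length, ∑ _j ∈ Finset.range cs.length, (81 : Int))
        = (cs.length : Int) * ((cs.length : Int) * 81) := by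
      simp [Finset.sum_const, Finset.card_range]
    rw [this] at hle
    have : (cs.length : Int) ≤ 10 := by exact_mod_cast hn
    nlinarith

-- str(x) has at most 10 characters for 0 ≤ x ≤ 2^31
lemma toStr_len (x : Int) (hx : 0 ≤ x) (hx2 : x ≤ 2147483648) :
    (PySem.Int.toStr x).toList.length ≤ 10 := by
  rw [PySem.Int.toList_toStr, PySem.Int.toChars, if_neg (by omega)]
  refine Nat.toDigits_length 10 x.toNat 10 (by norm_num) ?_
  have : x.toNat ≤ 2147483648 := by omega
  omega

-- B's extraction loop peels the base-10000 coefficients back off, one per iteration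
lemma ext_loop {α : Type} (L : List Int) (hL : ∀ a ∈ L, 0 ≤ a ∧ a < 10000)
    (r : List Char) (l : List α) (hlen : l.length = L.length) :
    l.foldl (fun (st : List Char × Int) _ =>
        (st.1 ++ PySem.Int.toChars (PySem.Int.mod (PySem.Int.mod st.2 10000) 10),
          PySem.Int.floordiv st.2 10000)) (r, potValB L)
      = (r ++ (L.map (fun a => PySem.Int.toChars (PySem.Int.mod a 10))).flatten, 0) := by
  induction L generalizing r l with
  | nil =>
    have : l = [] := List.eq_nil_of_length_eq_zero hlen
    subst this
    simp [potValB]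
  | cons a L ih =>
    cases l with
    | nil => simp at hlen
    | cons b l =>
      have hla : 0 ≤ a ∧ a < 10000 := hL a (by simp)
      rw [List.foldl_cons]
      have hmod : PySem.Int.mod (potValB (a :: L)) 10000 = a := by
        rw [potValB, List.foldr_cons, ← potValB,
          PySem.Int.mod_eq_emod_of_pos (by norm_num), Int.add_mul_emod_self_left,
          Int.emod_eq_of_lt hla.1 hla.2]
      have hdiv : PySem.Int.floordiv (potValB (a :: L)) 10000 = potValB L := by
        rw [potValB, List.foldr_cons, ← potValB,
          PySem.Int.floordiv_eq_ediv_of_pos (by norm_num),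
          Int.add_mul_ediv_left _ _ (by norm_num : (10000:Int) ≠ 0),
          Int.ediv_eq_zero_of_lt hla.1 hla.2, zero_add]
      simp only [hmod, hdiv]
      rw [ih (fun a ha => hL a (by simp [ha])) _ l (by simpa using hlen)]
      simp [List.append_assoc]

-- ===== VERDICT (by name: the statement is the Claim_ definition above) =====
set_option maxHeartbeats 1600000 in
theorem pot_spec : Claim_equal_pot := by
  intro x hdom hpre
  unfold Spec_pot
  have hdig : ∀ c ∈ (PySem.Int.toStr x).toList, c.isDigit = true := toStr_digits x hpre
  have hlen : (PySem.Int.toStr x).toList.length ≤ 10 := by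
    refine toStr_len x hpre ?_
    unfold Dom_pot pvDomInt at hdom
    simpa using (of_decide_eq_true hdom).2
  dsimp only [pot, pot_alt]
  rw [potA_loop, potP_eq, potVal_sum, potCauchy _ (by omega), ← potValB_map_range,
    ext_loop _ (fun a ha => by
      obtain ⟨k, -, rfl⟩ := List.mem_map.mp ha
      exact potConv_bounds _ hdig hlen k) []
      _ (by simp [PySem.List.pyRange_one])]
  have hz : (PySem.List.pyRange 0 100 1).map (fun _ => (0 : Int))
      = (List.replicate 100 (0:Int)).map (fun v => PySem.Int.mod v 10) := by decide
  rw [hz, potFoldM_eq_map_mod, ansA_eq,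
    res_loop _ (by simp), List.map_map, List.map_map]
  simp only [List.nil_append, List.map_map]
  rfl
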